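-- pv_equiv track=rewrite | github.com/Peerapataddall/contract_pwa | app/utils.py | _chunk_to_thai
-- ===== SOURCE A (Python) =====
-- THAI_DIGITS = ["ศูนย์","หนึ่ง","สอง","สาม","สี่","ห้า","หก","เจ็ด","แปด","เก้า"]
--
-- THAI_POS = ["","สิบ","ร้อย","พัน","หมื่น","แสน"]
--
-- def _chunk_to_thai(chunk: int) -> str:
--     # 0..999999
--     if chunk == 0:
--         return ""
--     parts = []
--     digits = [int(d) for d in f"{chunk:06d}"]  # แสน หมื่น พัน ร้อย สิบ หน่วย
--     for i, d in enumerate(digits):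
--         pos_from_right = 5 - i
--         if d == 0:
--             continue
--
--         if pos_from_right == 1:  # สิบ
--             if d == 1:
--                 parts.append("สิบ")
--             elif d == 2:
--                 parts.append("ยี่สิบ")
--             else:
--                 parts.append(f"{THAI_DIGITS[d]}สิบ")
--         elif pos_from_right == 0:  # หน่วย
--             # "เอ็ด" เมื่อมีหลักอื่นนำหน้า และหน่วยเป็น 1
--             if d == 1 and chunk % 100 != 0 and chunk != 1:
--                 parts.append("เอ็ด")
--             else:
--                 parts.append(THAI_DIGITS[d])
--         else:
--             parts.append(f"{THAI_DIGITS[d]}{THAI_POS[pos_from_right]}")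
--     return "".join(parts)
-- ===== SOURCE B (Python) =====
-- THAI_DIGITS = ["ศูนย์","หนึ่ง","สอง","สาม","สี่","ห้า","หก","เจ็ด","แปด","เก้า"]
--
-- def _two_digit(n, higher):
--     tens, units = divmod(n, 10)
--     s = ""
--     if tens == 1:
--         s = "สิบ"
--     elif tens == 2:
--         s = "ยี่สิบ"
--     elif tens > 0:
--         s = THAI_DIGITS[tens] + "สิบ"
--     if units == 1 and (higher or tens > 0):
--         s += "เอ็ด"
--     elif units > 0:
--         s += THAI_DIGITS[units]
--     return s
--
-- def _chunk_to_thai(chunk: int) -> str: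
--     if chunk == 0:
--         return ""
--     rest = chunk // 100
--     s = ""
--     for suffix, div in (("แสน", 1000), ("หมื่น", 100), ("พัน", 10), ("ร้อย", 1)):
--         d = rest // div % 10
--         if d:
--             s += THAI_DIGITS[d] + suffix
--     return s + _two_digit(chunk % 100, rest > 0)
-- ===== Notes on version B (the rewrite author's own statement) =====
-- stated objective: alternative
-- what changed: Replaces the format-string/enumerate digit loop over the zero-padded decimal string with direct arithmetic place extraction: a loop over the four high places of the hundreds part plus a dedicated helper for the low two places handling the tens and the unit word, exploiting that A's unit-word condition simplifies to the chunk not being exactly one.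
-- outside the precondition, e.g. on _chunk_to_thai(1000000): A returns 'หนึ่งแสน', B returns ''; on _chunk_to_thai(-1): A raises ValueError, B returns 'เก้าแสนเก้าหมื่นเก้าพันเก้าร้อยเก้าสิบเก้า'
import Mathlib
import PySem

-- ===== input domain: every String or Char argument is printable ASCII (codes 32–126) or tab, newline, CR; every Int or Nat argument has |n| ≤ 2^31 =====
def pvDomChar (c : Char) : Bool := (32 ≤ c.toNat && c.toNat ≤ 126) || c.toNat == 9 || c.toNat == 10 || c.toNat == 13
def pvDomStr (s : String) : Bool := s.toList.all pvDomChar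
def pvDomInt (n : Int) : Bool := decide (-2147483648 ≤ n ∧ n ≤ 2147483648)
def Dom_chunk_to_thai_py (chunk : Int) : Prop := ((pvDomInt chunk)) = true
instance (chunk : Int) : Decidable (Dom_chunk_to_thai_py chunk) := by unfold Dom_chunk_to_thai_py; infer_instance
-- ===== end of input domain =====

-- B replaces A's format-string/enumerate digit loop by direct arithmetic place
-- extraction (a loop over the four high decimal places plus a helper for the low
-- two places); objective: alternative (same value on the documented domain Pre_).

-- ===== PORT A =====
def pvThaiDigits : List String := ["ศูนย์","หนึ่ง","สอง","สาม","สี่","ห้า","หก","เจ็ด","แปด","เก้า"]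
def pvThaiPos : List String := ["","สิบ","ร้อย","พัน","หมื่น","แสน"]

def pvDigitsA (chunk : Int) : List Int :=
  [PySem.Int.mod (PySem.Int.floordiv chunk 100000) 10,
   PySem.Int.mod (PySem.Int.floordiv chunk 10000) 10,
   PySem.Int.mod (PySem.Int.floordiv chunk 1000) 10,
   PySem.Int.mod (PySem.Int.floordiv chunk 100) 10,
   PySem.Int.mod (PySem.Int.floordiv chunk 10) 10,
   PySem.Int.mod chunk 10]

-- the loop body of A (one step of 'for i, d in enumerate(digits)')
def pvStepA (chunk : Int) (parts : List String) (id : Int × Int) : List String :=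
  let i := id.1
  let d := id.2
  let pos_from_right : Int := 5 - i
  if d = 0 then parts
  else if pos_from_right = 1 then
    (if d = 1 then parts ++ ["สิบ"]
     else if d = 2 then parts ++ ["ยี่สิบ"]
     else parts ++ [((PySem.List.pyGet? pvThaiDigits d).getD "") ++ "สิบ"])
  else if pos_from_right = 0 then
    (if d = 1 ∧ PySem.Int.mod chunk 100 ≠ 0 ∧ chunk ≠ 1 then parts ++ ["เอ็ด"]
     else parts ++ [(PySem.List.pyGet? pvThaiDigits d).getD ""])
  else
    parts ++ [((PySem.List.pyGet? pvThaiDigits d).getD "") ++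
              ((PySem.List.pyGet? pvThaiPos pos_from_right).getD "")]

def chunk_to_thai_py (chunk : Int) : String :=
  if chunk = 0 then "" else
  let parts : List String := (PySem.List.enumerate (pvDigitsA chunk)).foldl (pvStepA chunk) []
  PySem.Str.join "" parts

def pvTwoDigit (n : Int) (higher : Bool) : String :=
  let tens := PySem.Int.floordiv n 10
  let units := PySem.Int.mod n 10
  let s : String :=
    if tens = 1 then "สิบ"
    else if tens = 2 then "ยี่สิบ"
    else if tens > 0 then ((PySem.List.pyGet? pvThaiDigits tens).getD "") ++ "สิบ"
    else ""
  if units = 1 ∧ (higher || decide (tens > 0)) = true then s ++ "เอ็ด"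
  else if units > 0 then s ++ ((PySem.List.pyGet? pvThaiDigits units).getD "")
  else s

def chunk_to_thai_py_alt (chunk : Int) : String :=
  if chunk = 0 then "" else
  let rest := PySem.Int.floordiv chunk 100
  let s := [("แสน", (1000:Int)), ("หมื่น", 100), ("พัน", 10), ("ร้อย", 1)].foldl
    (fun s sd =>
      let d := PySem.Int.mod (PySem.Int.floordiv rest sd.2) 10
      if d ≠ 0 then s ++ ((PySem.List.pyGet? pvThaiDigits d).getD "") ++ sd.1 else s) ""
  s ++ pvTwoDigit (PySem.Int.mod chunk 100) (decide (rest > 0))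


-- ===== PRECONDITION & SPEC =====
-- Pre_ restricts to the function's documented natural domain (at most six decimal digits):
-- on negative chunk the Python A raises ValueError (int('-') on the padded string), and at
-- one million and above A's value is an accident of negative-index wraparound (THAI_POS[-1])
-- outside that documented domain.
def Pre_chunk_to_thai_py (chunk : Int) : Prop := 0 ≤ chunk ∧ chunk ≤ 999999
instance (chunk : Int) : Decidable (Pre_chunk_to_thai_py chunk) := by unfold Pre_chunk_to_thai_py; infer_instance
def pvWitness_chunk_to_thai_py : Int := (21)

def Spec_chunk_to_thai_py (chunk : Int) (out : String) : Prop := out = chunk_to_thai_py_alt chunk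
instance (chunk : Int) (out : String) : Decidable (Spec_chunk_to_thai_py chunk out) := by unfold Spec_chunk_to_thai_py; infer_instance

-- ===== CLAIM (what is proved, stated in full; the proofs are below) =====
def Claim_equal_chunk_to_thai_py : Prop := ∀ (chunk : Int), Dom_chunk_to_thai_py chunk → Pre_chunk_to_thai_py chunk → Spec_chunk_to_thai_py chunk (chunk_to_thai_py chunk)

-- ===== LEMMAS AND PROOFS =====

def pvGA (chunk : Int) (id : Int × Int) : List String :=
  if id.2 = 0 then []
  else if 5 - id.1 = 1 then
    [if id.2 = 1 then "สิบ" else if id.2 = 2 then "ยี่สิบ"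
     else ((PySem.List.pyGet? pvThaiDigits id.2).getD "") ++ "สิบ"]
  else if 5 - id.1 = 0 then
    [if id.2 = 1 ∧ PySem.Int.mod chunk 100 ≠ 0 ∧ chunk ≠ 1 then "เอ็ด"
     else (PySem.List.pyGet? pvThaiDigits id.2).getD ""]
  else
    [((PySem.List.pyGet? pvThaiDigits id.2).getD "") ++
     ((PySem.List.pyGet? pvThaiPos (5 - id.1)).getD "")]

theorem pvStepA_eq (chunk : Int) : pvStepA chunk = fun parts id => parts ++ pvGA chunk id := by
  funext parts id
  simp only [pvStepA, pvGA]
  split_ifs <;> simp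

theorem pvJoinChars (l : List (List Char)) : PySem.Chars.join [] l = l.flatten := by
  induction l with
  | nil => simp [PySem.Chars.join_nil]
  | cons h t ih =>
    cases t with
    | nil => simp [PySem.Chars.join_singleton]
    | cons b r => simp [PySem.Chars.join_cons_cons, ih]
    

theorem pvJoinAppend (xs ys : List String) :
    PySem.Str.join "" (xs ++ ys) = PySem.Str.join "" xs ++ PySem.Str.join "" ys := by
  apply String.toList_injective
  simp [pvJoinChars, String.toList_append]

theorem pvJoinSingleton (s : String) : PySem.Str.join "" [s] = s := by
  apply String.toList_injective
  simp

theorem pvJoinNil : PySem.Str.join "" ([] : List String) = "" := by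
  apply String.toList_injective
  simp


theorem pvJoinIf (c : Prop) [Decidable c] (s : String) :
    PySem.Str.join "" (if c then [] else [s]) = if c then "" else s := by
  split
  · exact pvJoinNil
  · exact pvJoinSingleton s


theorem pvHighEq (c5 c4 c3 c2 : Prop) [Decidable c5] [Decidable c4] [Decidable c3] [Decidable c2]
    (g5 g4 g3 g2 rest : String) :
    (if c2 then
       (if c3 then
          (if c4 then (if c5 then "" else g5 ++ "แสน")
           else (if c5 then "" else g5 ++ "แสน") ++ g4 ++ "หมื่น")
        else
          (if c4 then (if c5 then "" else g5 ++ "แสน")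
           else (if c5 then "" else g5 ++ "แสน") ++ g4 ++ "หมื่น") ++ g3 ++ "พัน")
     else
       (if c3 then
          (if c4 then (if c5 then "" else g5 ++ "แสน")
           else (if c5 then "" else g5 ++ "แสน") ++ g4 ++ "หมื่น")
        else
          (if c4 then (if c5 then "" else g5 ++ "แสน")
           else (if c5 then "" else g5 ++ "แสน") ++ g4 ++ "หมื่น") ++ g3 ++ "พัน") ++ g2 ++ "ร้อย") ++ rest
    = (if c5 then "" else g5 ++ "แสน") ++
       ((if c4 then "" else g4 ++ "หมื่น") ++
        ((if c3 then "" else g3 ++ "พัน") ++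
         ((if c2 then "" else g2 ++ "ร้อย") ++ rest))) := by
  split_ifs <;>
    simp only [String.append_assoc, String.empty_append]

theorem pvLowEq (chunk : Int) (h0 : 0 ≤ chunk) (h9 : chunk ≤ 999999) :
    (if 10 ∣ chunk / 10 then ""
     else
       if chunk / 10 % 10 = 1 then "สิบ"
       else
         if chunk / 10 % 10 = 2 then "ยี่สิบ"
         else (PySem.List.pyGet? pvThaiDigits (chunk / 10 % 10)).getD "" ++ "สิบ") ++
      (if 10 ∣ chunk then ""
       else
         if chunk % 10 = 1 ∧ ¬100 ∣ chunk ∧ ¬chunk = 1 then "เอ็ด"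
         else (PySem.List.pyGet? pvThaiDigits (chunk % 10)).getD "")
    = (if chunk % 10 = 1 ∧ (0 < chunk / 100 ∨ 0 < chunk / 10 % 10) then
         (if chunk / 10 % 10 = 1 then "สิบ"
          else
            if chunk / 10 % 10 = 2 then "ยี่สิบ"
            else
              if 0 < chunk / 10 % 10 then (PySem.List.pyGet? pvThaiDigits (chunk / 10 % 10)).getD "" ++ "สิบ"
              else "") ++ "เอ็ด"
       else
         if 0 < chunk % 10 then
           (if chunk / 10 % 10 = 1 then "สิบ"
            else
              if chunk / 10 % 10 = 2 then "ยี่สิบ"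
              else
                if 0 < chunk / 10 % 10 then (PySem.List.pyGet? pvThaiDigits (chunk / 10 % 10)).getD "" ++ "สิบ"
                else "") ++ (PySem.List.pyGet? pvThaiDigits (chunk % 10)).getD ""
         else
           if chunk / 10 % 10 = 1 then "สิบ"
           else
             if chunk / 10 % 10 = 2 then "ยี่สิบ"
             else
               if 0 < chunk / 10 % 10 then (PySem.List.pyGet? pvThaiDigits (chunk / 10 % 10)).getD "" ++ "สิบ"
               else "") := by
  split_ifs <;>
    first
      | (exfalso; omega)
      | simp only [String.append_assoc, String.append_empty, String.empty_append]

set_option maxHeartbeats 1000000 in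
theorem pvMain (chunk : Int) (h0 : 0 ≤ chunk) (h9 : chunk ≤ 999999) :
    chunk_to_thai_py chunk = chunk_to_thai_py_alt chunk := by
  by_cases hz : chunk = 0
  · subst hz; rfl
  · simp only [chunk_to_thai_py, chunk_to_thai_py_alt, hz, pvDigitsA, pvTwoDigit,
      pvStepA_eq, PySem.List.foldl_append_eq_flatMap,
      PySem.List.enumerate_cons, PySem.List.enumerate_nil, List.foldl,
      List.flatMap_cons, List.flatMap_nil, pvGA, List.nil_append, List.append_nil]
    norm_num [pvJoinAppend, pvJoinIf, pvJoinNil, pvJoinSingleton]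
    have e1 : chunk / 100 / 1000 = chunk / 100000 := by omega
    have e2 : chunk / 100 / 100 = chunk / 10000 := by omega
    have e3 : chunk / 100 / 10 = chunk / 1000 := by omega
    have e5 : chunk % 100 / 10 = chunk / 10 % 10 := by omega
    have e6 : chunk % 100 % 10 = chunk % 10 := by omega
    simp only [e1, e2, e3, e5]
    have hP5 : (PySem.List.pyGet? pvThaiPos 5).getD "" = "แสน" := rfl
    have hP4 : (PySem.List.pyGet? pvThaiPos 4).getD "" = "หมื่น" := rfl
    have hP3 : (PySem.List.pyGet? pvThaiPos 3).getD "" = "พัน" := rfl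
    have hP2 : (PySem.List.pyGet? pvThaiPos 2).getD "" = "ร้อย" := rfl
    rw [hP5, hP4, hP3, hP2]
    rw [pvHighEq]
    rw [pvLowEq chunk h0 h9]

-- ===== VERDICT (by name: the statement is the Claim_ definition above) =====
theorem chunk_to_thai_py_spec : Claim_equal_chunk_to_thai_py := by
  intro chunk _ pre
  exact pvMain chunk pre.1 pre.2
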